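-- pv_equiv track=rewrite | github.com/cleangun/Baekjoon_CondingTest | python_silver4_1026.py | dfs
-- ===== SOURCE A (Python) =====
-- def dfs(Aarr, Barr, A_visit, B_visit, lv, sum, min):
--   if sum > min:
--     return min
--
--   if lv == len(Aarr):
--     if sum <= min:
--       min = sum
--     return min
--
--   for bidx in range(len(Barr)):
--     if bidx in B_visit:  # B 인덱스 방문 했대요
--       continue
--
--     B_visit.append(bidx)
--     for aidx in range(len(Aarr)):
--       if aidx in A_visit:  # B인덱스는 해당 A인덱스를 접근 불가(이미 접근됨)
--         continue
--
--       A_visit.append(aidx)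
--       tmp = sum + (Barr[bidx] * Aarr[aidx])
--       min = dfs(Aarr, Barr, A_visit, B_visit, lv + 1, tmp, min)
--       A_visit.pop()
--     B_visit.pop()
--
--   return min
-- ===== SOURCE B (Python) =====
-- def dfs(Aarr, Barr, A_visit, B_visit, lv, sum, min):
--     # Iterative depth-first search with an explicit stack of immutable frames
--     # (same exploration order and pruning as the recursive backtracker).
--     best = min
--     stack = [(list(A_visit), list(B_visit), lv, sum)]
--     while stack:
--         Av, Bv, level, s = stack.pop()
--         if s > best:
--             continue
--         if level == len(Aarr):
--             best = s
--             continue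
--         children = [(Av + [a], Bv + [b], level + 1, s + Barr[b] * Aarr[a])
--                     for b in range(len(Barr)) if b not in Bv
--                     for a in range(len(Aarr)) if a not in Av]
--         stack.extend(reversed(children))
--     return best
-- ===== Notes on version B (the rewrite author's own statement) =====
-- stated objective: alternative
-- what changed: The recursive backtracker with in-place visited-list mutation is replaced by an iterative while-loop over an explicit stack of immutable frames (visited lists, level, partial sum), materializing each node's children with a comprehension and pushing them reversed; same exploration order and pruning, so the return value is identical.
import Mathlib
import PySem

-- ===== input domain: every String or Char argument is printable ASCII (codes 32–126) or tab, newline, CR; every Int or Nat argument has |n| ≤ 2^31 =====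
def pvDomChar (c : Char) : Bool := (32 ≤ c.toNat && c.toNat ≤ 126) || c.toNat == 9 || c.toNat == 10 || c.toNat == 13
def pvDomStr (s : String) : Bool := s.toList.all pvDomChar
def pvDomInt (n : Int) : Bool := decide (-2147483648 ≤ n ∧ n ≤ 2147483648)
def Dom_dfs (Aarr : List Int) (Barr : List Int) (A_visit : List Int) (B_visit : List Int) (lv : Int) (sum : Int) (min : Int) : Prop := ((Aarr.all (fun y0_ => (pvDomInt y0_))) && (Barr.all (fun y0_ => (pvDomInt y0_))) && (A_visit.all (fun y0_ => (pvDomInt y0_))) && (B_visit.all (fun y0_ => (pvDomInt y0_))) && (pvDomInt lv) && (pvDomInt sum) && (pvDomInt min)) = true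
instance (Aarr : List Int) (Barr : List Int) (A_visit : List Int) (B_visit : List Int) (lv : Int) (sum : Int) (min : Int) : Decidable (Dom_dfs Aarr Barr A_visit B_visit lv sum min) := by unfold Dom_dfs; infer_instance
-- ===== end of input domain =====

-- B replaces A's recursive backtracking (with in-place visited-list mutation, which A restores
-- before returning, so only the return value is observable) by an iterative loop over an explicit
-- stack of immutable frames, same exploration order and pruning; objective: alternative, not faster.

-- number of indices i < n with (i : Int) not in visit; both ports use it only to size their
-- fuel guard (the recursion provably consumes less)
def availCount (n : Nat) (visit : List Int) : Nat :=
  ((List.range n).filter (fun i => !visit.contains (Int.ofNat i))).length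

-- ===== PORT A =====
-- literal transliteration of A: recursion + two nested for-loops (as foldl) with `continue` on
-- visited indices; Python's append/pop pair is modelled by passing `visit ++ [idx]` to the
-- recursive call only (the list is restored before the loop continues, exactly as in Python).
-- The Nat fuel is only a totality guard: availCount strictly decreases at each recursive call,
-- so the 0 case is never reached.
def dfsGo (Aarr : List Int) (Barr : List Int) : Nat → List Int → List Int → Int → Int → Int → Int
  | 0, _, _, _, _, min => min
  | fuel + 1, A_visit, B_visit, lv, sum, min =>
    if sum > min then min
    else if lv = (Aarr.length : Int) then (if sum ≤ min then sum else min)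
    else
      (List.range Barr.length).attach.foldl (fun min b =>
        if B_visit.contains (Int.ofNat b.1) then min
        else
          (List.range Aarr.length).attach.foldl (fun min a =>
            if A_visit.contains (Int.ofNat a.1) then min
            else
              dfsGo Aarr Barr fuel (A_visit ++ [Int.ofNat a.1]) (B_visit ++ [Int.ofNat b.1])
                (lv + 1)
                (sum + Barr[b.1]'(List.mem_range.mp b.2) * Aarr[a.1]'(List.mem_range.mp a.2))
                min) min) min

def dfs (Aarr : List Int) (Barr : List Int) (A_visit : List Int) (B_visit : List Int) (lv : Int) (sum : Int) (min : Int) : Int :=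
  dfsGo Aarr Barr (availCount Aarr.length A_visit + 1) A_visit B_visit lv sum min

-- ===== PORT B =====
-- the children list comprehension of Source B (a stack frame is (A_visit, B_visit, lv, sum))
def childrenOf (Aarr : List Int) (Barr : List Int) (Av : List Int) (Bv : List Int) (lv : Int) (s : Int) :
    List (List Int × List Int × Int × Int) :=
  (List.range Barr.length).attach.flatMap (fun b =>
    if Bv.contains (Int.ofNat b.1) then []
    else (List.range Aarr.length).attach.filterMap (fun a =>
      if Av.contains (Int.ofNat a.1) then none
      else some (Av ++ [Int.ofNat a.1], Bv ++ [Int.ofNat b.1], lv + 1,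
                 s + Barr[b.1]'(List.mem_range.mp b.2) * Aarr[a.1]'(List.mem_range.mp a.2))))

-- fuel bound for the while-loop: every pop strictly decreases this weight
def stackWeight (Aarr Barr : List Int) (stack : List (List Int × List Int × Int × Int)) : Nat :=
  (stack.map (fun f => (Aarr.length * Barr.length + 1) ^ availCount Aarr.length f.1)).sum

-- the while-loop of Source B; the head of the list is the top of Python's stack, so
-- `stack.extend(reversed(children))` followed by popping corresponds to `children ++ rest`.
-- The Nat fuel is only a totality guard: stackWeight strictly decreases at each iteration,
-- so the 0 case is never reached.
def runGo (Aarr : List Int) (Barr : List Int) :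
    Nat → List (List Int × List Int × Int × Int) → Int → Int
  | 0, _, best => best
  | _ + 1, [], best => best
  | fuel + 1, (Av, Bv, lv, s) :: rest, best =>
    if s > best then runGo Aarr Barr fuel rest best
    else if lv = (Aarr.length : Int) then runGo Aarr Barr fuel rest s
    else runGo Aarr Barr fuel (childrenOf Aarr Barr Av Bv lv s ++ rest) best

def dfs_alt (Aarr : List Int) (Barr : List Int) (A_visit : List Int) (B_visit : List Int) (lv : Int) (sum : Int) (min : Int) : Int :=
  runGo Aarr Barr (stackWeight Aarr Barr [(A_visit, B_visit, lv, sum)] + 1)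
    [(A_visit, B_visit, lv, sum)] min

-- ===== PRECONDITION & SPEC =====
def Spec_dfs (Aarr : List Int) (Barr : List Int) (A_visit : List Int) (B_visit : List Int) (lv : Int) (sum : Int) (min : Int) (out : Int) : Prop := out = dfs_alt Aarr Barr A_visit B_visit lv sum min
instance (Aarr : List Int) (Barr : List Int) (A_visit : List Int) (B_visit : List Int) (lv : Int) (sum : Int) (min : Int) (out : Int) : Decidable (Spec_dfs Aarr Barr A_visit B_visit lv sum min out) := by unfold Spec_dfs; infer_instance

-- ===== CLAIM (what is proved, stated in full; the proofs are below) =====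
def Claim_equal_dfs : Prop := ∀ (Aarr : List Int) (Barr : List Int) (A_visit : List Int) (B_visit : List Int) (lv : Int) (sum : Int) (min : Int), Dom_dfs Aarr Barr A_visit B_visit lv sum min → Spec_dfs Aarr Barr A_visit B_visit lv sum min (dfs Aarr Barr A_visit B_visit lv sum min)

-- ===== LEMMAS AND PROOFS =====

-- appending a fresh in-range index strictly decreases availCount
theorem availCount_append_lt (n : Nat) (visit : List Int) (a : Nat) (ha : a ∈ List.range n)
    (hc : visit.contains (Int.ofNat a) = false) :
    availCount n (visit ++ [Int.ofNat a]) < availCount n visit := by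
  have hq : ∀ i ∈ List.range n, (!(visit ++ [Int.ofNat a]).contains (Int.ofNat i))
      = (!visit.contains (Int.ofNat i) && !(i == a)) := by
    intro i _
    by_cases h : i = a
    · subst h; simp
    · have hna : (i == a) = false := by simp [h]
      simp [hna, h]
  unfold availCount
  rw [List.filter_congr hq]
  obtain ⟨l1, l2, hsplit⟩ := List.append_of_mem ha
  rw [hsplit]
  have mono : ∀ (l : List Nat),
      (l.filter (fun i => !visit.contains (Int.ofNat i) && !(i == a))).length
        ≤ (l.filter (fun i => !visit.contains (Int.ofNat i))).length := by
    intro l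
    rw [← List.countP_eq_length_filter, ← List.countP_eq_length_filter]
    exact List.countP_mono_left (fun x _ hx => (Bool.and_eq_true _ _ |>.mp hx).1)
  have hqa : (!visit.contains (Int.ofNat a) && !(a == a)) = false := by simp
  have hpa : (!visit.contains (Int.ofNat a)) = true := by rw [hc]; rfl
  rw [List.filter_append, List.filter_append, List.length_append, List.length_append,
    List.filter_cons, List.filter_cons, hqa, hpa, if_neg Bool.false_ne_true, if_pos rfl]
  simp only [List.length_cons]
  have m1 := mono l1
  have m2 := mono l2
  omega

-- every child frame has strictly smaller availCount than its parent
theorem mem_childrenOf {Aarr Barr Av Bv : List Int} {lv s : Int}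
    {c : List Int × List Int × Int × Int} (hc : c ∈ childrenOf Aarr Barr Av Bv lv s) :
    availCount Aarr.length c.1 < availCount Aarr.length Av := by
  unfold childrenOf at hc
  simp only [List.mem_flatMap, List.mem_attach, true_and] at hc
  obtain ⟨b, hb⟩ := hc
  by_cases hbv : Bv.contains (Int.ofNat b.1) = true
  · rw [if_pos hbv] at hb; simp at hb
  · rw [if_neg hbv] at hb
    simp only [List.mem_filterMap, List.mem_attach, true_and] at hb
    obtain ⟨a, ha⟩ := hb
    by_cases hav : Av.contains (Int.ofNat a.1) = true
    · rw [if_pos hav] at ha; simp at ha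
    · rw [if_neg hav] at ha
      obtain rfl := Option.some_inj.mp ha
      exact availCount_append_lt _ _ _ a.2 (by simpa using hav)

-- the total weight of a node's children is strictly below the node's own weight
theorem childrenWeight_lt (Aarr Barr Av Bv : List Int) (lv s : Int) :
    ((childrenOf Aarr Barr Av Bv lv s).map
        (fun f => (Aarr.length * Barr.length + 1) ^ availCount Aarr.length f.1)).sum
      < (Aarr.length * Barr.length + 1) ^ availCount Aarr.length Av := by
  set K := Aarr.length * Barr.length + 1 with hK
  set v := availCount Aarr.length Av with hv
  have hKpos : 0 < K := by omega
  rcases List.eq_nil_or_concat (childrenOf Aarr Barr Av Bv lv s) with hnil | ⟨_, _, hne⟩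
  · rw [hnil]; simpa using Nat.pow_pos hKpos
  · have hnonempty : childrenOf Aarr Barr Av Bv lv s ≠ [] := by
      rw [hne]; simp
    obtain ⟨c0, hc0⟩ := List.exists_mem_of_ne_nil _ hnonempty
    have hv1 : 1 ≤ v := by
      have := mem_childrenOf hc0
      omega
    have hbound : ∀ x ∈ (childrenOf Aarr Barr Av Bv lv s).map
        (fun f => K ^ availCount Aarr.length f.1), x ≤ K ^ (v - 1) := by
      intro x hx
      simp only [List.mem_map] at hx
      obtain ⟨f, hf, rfl⟩ := hx
      have h := mem_childrenOf hf
      exact Nat.pow_le_pow_right hKpos (by omega)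
    have hsum := List.sum_le_card_nsmul _ _ hbound
    rw [List.length_map, smul_eq_mul] at hsum
    have hlen : (childrenOf Aarr Barr Av Bv lv s).length ≤ Barr.length * Aarr.length := by
      unfold childrenOf
      rw [List.length_flatMap]
      have hb : ∀ x ∈ ((List.range Barr.length).attach.map (fun b =>
          (if Bv.contains (Int.ofNat b.1) then ([] : List (List Int × List Int × Int × Int))
           else (List.range Aarr.length).attach.filterMap (fun a =>
            if Av.contains (Int.ofNat a.1) then none
            else some (Av ++ [Int.ofNat a.1], Bv ++ [Int.ofNat b.1], lv + 1,
                 s + Barr[b.1]'(List.mem_range.mp b.2) * Aarr[a.1]'(List.mem_range.mp a.2)))).length)),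
          x ≤ Aarr.length := by
        intro x hx
        simp only [List.mem_map] at hx
        obtain ⟨b, hbmem, rfl⟩ := hx
        split
        · simp
        · calc ((List.range Aarr.length).attach.filterMap _).length
              ≤ (List.range Aarr.length).attach.length := List.length_filterMap_le _ _
            _ = Aarr.length := by simp
      have := List.sum_le_card_nsmul _ _ hb
      simpa [smul_eq_mul] using this
    have hKm1 : (childrenOf Aarr Barr Av Bv lv s).length ≤ K - 1 := by
      have hcomm : Barr.length * Aarr.length = Aarr.length * Barr.length := Nat.mul_comm _ _
      omega
    have hfinal : (childrenOf Aarr Barr Av Bv lv s).length * K ^ (v - 1) < K ^ v := by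
      have hpow : 0 < K ^ (v - 1) := Nat.pow_pos hKpos
      have h1 : (childrenOf Aarr Barr Av Bv lv s).length * K ^ (v - 1) ≤ (K - 1) * K ^ (v - 1) :=
        Nat.mul_le_mul_right _ hKm1
      have h2 : (K - 1) * K ^ (v - 1) < K * K ^ (v - 1) :=
        (Nat.mul_lt_mul_right hpow).mpr (by omega)
      have h3 : K * K ^ (v - 1) = K ^ v := by
        conv_rhs => rw [show v = (v - 1) + 1 by omega]
        rw [pow_succ]; ring
      omega
    omega

-- the fuel guard is irrelevant once it exceeds availCount
theorem dfsGo_irrel (Aarr Barr : List Int) :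
    ∀ (f1 : Nat), ∀ (f2 : Nat) (Av Bv : List Int) (lv s m : Int),
      availCount Aarr.length Av < f1 → availCount Aarr.length Av < f2 →
      dfsGo Aarr Barr f1 Av Bv lv s m = dfsGo Aarr Barr f2 Av Bv lv s m := by
  intro f1
  induction f1 with
  | zero => intro f2 Av Bv lv s m h1 _; omega
  | succ f1 ih =>
    intro f2 Av Bv lv s m h1 h2
    match f2 with
    | 0 => omega
    | f2 + 1 =>
      rw [dfsGo, dfsGo]
      by_cases hp : s > m
      · rw [if_pos hp, if_pos hp]
      · rw [if_neg hp, if_neg hp]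
        by_cases hl : lv = (Aarr.length : Int)
        · rw [if_pos hl, if_pos hl]
        · rw [if_neg hl, if_neg hl]
          apply List.foldl_ext
          intro mb b _
          split_ifs with hbv
          · rfl
          · apply List.foldl_ext
            intro ma a _
            split_ifs with hav
            · rfl
            · have hC : Av.contains (Int.ofNat a.1) = false := by simpa using hav
              have hlt := availCount_append_lt Aarr.length Av a.1 a.2 hC
              exact ih f2 _ _ _ _ _ (by omega) (by omega)

-- folding one dfs call per frame (the body of the loop correspondence)
def nodeStep (Aarr Barr : List Int) (m : Int) (c : List Int × List Int × Int × Int) : Int :=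
  dfs Aarr Barr c.1 c.2.1 c.2.2.1 c.2.2.2 m

-- the inner a-loop equals a fold of dfs over its filtered candidate frames
theorem loopA_foldl (Aarr Barr Av Bv : List Int) (lv s : Int) (v : Nat)
    (hv : availCount Aarr.length Av ≤ v)
    (b : {b // b ∈ List.range Barr.length}) :
    ∀ (al : List {a // a ∈ List.range Aarr.length}) (m : Int),
      al.foldl (fun m a =>
          if Av.contains (Int.ofNat a.1) then m
          else dfsGo Aarr Barr v (Av ++ [Int.ofNat a.1]) (Bv ++ [Int.ofNat b.1]) (lv + 1)
            (s + Barr[b.1]'(List.mem_range.mp b.2) * Aarr[a.1]'(List.mem_range.mp a.2)) m) m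
        = List.foldl (nodeStep Aarr Barr) m
            (al.filterMap (fun a =>
              if Av.contains (Int.ofNat a.1) then none
              else some (Av ++ [Int.ofNat a.1], Bv ++ [Int.ofNat b.1], lv + 1,
                s + Barr[b.1]'(List.mem_range.mp b.2) * Aarr[a.1]'(List.mem_range.mp a.2)))) := by
  intro al
  induction al with
  | nil => intro m; rfl
  | cons a as ih =>
    intro m
    rw [List.foldl_cons, List.filterMap_cons]
    split_ifs with h
    · exact ih m
    · have hC : Av.contains (Int.ofNat a.1) = false := by simpa using h
      have hlt := availCount_append_lt Aarr.length Av a.1 a.2 hC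
      have heq := dfsGo_irrel Aarr Barr v
        (availCount Aarr.length (Av ++ [Int.ofNat a.1]) + 1)
        (Av ++ [Int.ofNat a.1]) (Bv ++ [Int.ofNat b.1]) (lv + 1)
        (s + Barr[b.1]'(List.mem_range.mp b.2) * Aarr[a.1]'(List.mem_range.mp a.2)) m
        (by omega) (by omega)
      rw [heq, ih]
      rfl

-- the outer b-loop equals a fold of dfs over the flattened candidate frames
theorem loopB_foldl (Aarr Barr Av Bv : List Int) (lv s : Int) (v : Nat)
    (hv : availCount Aarr.length Av ≤ v) :
    ∀ (bl : List {b // b ∈ List.range Barr.length}) (m : Int),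
      bl.foldl (fun m b =>
          if Bv.contains (Int.ofNat b.1) then m
          else (List.range Aarr.length).attach.foldl (fun m a =>
            if Av.contains (Int.ofNat a.1) then m
            else dfsGo Aarr Barr v (Av ++ [Int.ofNat a.1]) (Bv ++ [Int.ofNat b.1]) (lv + 1)
              (s + Barr[b.1]'(List.mem_range.mp b.2) * Aarr[a.1]'(List.mem_range.mp a.2)) m) m) m
        = List.foldl (nodeStep Aarr Barr) m
            (bl.flatMap (fun b =>
              if Bv.contains (Int.ofNat b.1) then []
              else (List.range Aarr.length).attach.filterMap (fun a =>
                if Av.contains (Int.ofNat a.1) then none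
                else some (Av ++ [Int.ofNat a.1], Bv ++ [Int.ofNat b.1], lv + 1,
                  s + Barr[b.1]'(List.mem_range.mp b.2) * Aarr[a.1]'(List.mem_range.mp a.2))))) := by
  intro bl
  induction bl with
  | nil => intro m; rfl
  | cons b bs ih =>
    intro m
    rw [List.foldl_cons, List.flatMap_cons]
    split_ifs with h
    · rw [List.nil_append]
      exact ih m
    · rw [List.foldl_append, loopA_foldl Aarr Barr Av Bv lv s v hv b, ih]

-- A's dfs, written as prune / leaf / fold-over-children
theorem dfs_eq_node (Aarr Barr Av Bv : List Int) (lv s m : Int) :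
    dfs Aarr Barr Av Bv lv s m
      = if s > m then m
        else if lv = (Aarr.length : Int) then (if s ≤ m then s else m)
        else List.foldl (nodeStep Aarr Barr) m (childrenOf Aarr Barr Av Bv lv s) := by
  unfold dfs
  rw [dfsGo]
  by_cases h1 : s > m
  · rw [if_pos h1, if_pos h1]
  · rw [if_neg h1, if_neg h1]
    by_cases h2 : lv = (Aarr.length : Int)
    · rw [if_pos h2, if_pos h2]
    · rw [if_neg h2, if_neg h2,
        loopB_foldl Aarr Barr Av Bv lv s (availCount Aarr.length Av) le_rfl]
      rfl

-- B's while-loop with normalized fuel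
def run (Aarr Barr : List Int) (stack : List (List Int × List Int × Int × Int)) (best : Int) : Int :=
  runGo Aarr Barr (stackWeight Aarr Barr stack + 1) stack best

-- the fuel guard is irrelevant once it exceeds the stack weight
theorem runGo_irrel (Aarr Barr : List Int) :
    ∀ (f1 : Nat), ∀ (f2 : Nat) (stack : List (List Int × List Int × Int × Int)) (best : Int),
      stackWeight Aarr Barr stack < f1 → stackWeight Aarr Barr stack < f2 →
      runGo Aarr Barr f1 stack best = runGo Aarr Barr f2 stack best := by
  intro f1
  induction f1 with
  | zero => intro f2 stack best h1 _; omega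
  | succ f1 ih =>
    intro f2 stack best h1 h2
    match f2 with
    | 0 => omega
    | f2 + 1 =>
      match stack with
      | [] => rw [runGo, runGo]
      | (Av, Bv, lv, s) :: rest =>
        have hw : 0 < (Aarr.length * Barr.length + 1) ^ availCount Aarr.length Av :=
          Nat.pow_pos (Nat.succ_pos _)
        have hsw : stackWeight Aarr Barr ((Av, Bv, lv, s) :: rest)
            = (Aarr.length * Barr.length + 1) ^ availCount Aarr.length Av
              + stackWeight Aarr Barr rest := by
          simp [stackWeight]
        rw [runGo, runGo]
        by_cases hp : s > best
        · rw [if_pos hp, if_pos hp]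
          exact ih f2 rest best (by omega) (by omega)
        · by_cases hl : lv = (Aarr.length : Int)
          · rw [if_neg hp, if_neg hp, if_pos hl, if_pos hl]
            exact ih f2 rest s (by omega) (by omega)
          · rw [if_neg hp, if_neg hp, if_neg hl, if_neg hl]
            have hch : stackWeight Aarr Barr (childrenOf Aarr Barr Av Bv lv s ++ rest)
                < stackWeight Aarr Barr ((Av, Bv, lv, s) :: rest) := by
              have := childrenWeight_lt Aarr Barr Av Bv lv s
              simp only [stackWeight, List.map_append, List.sum_append] at *
              omega
            rw [hsw] at hch
            exact ih f2 _ best (by omega) (by omega)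

-- the three step equations of the normalized while-loop
theorem run_nil (Aarr Barr : List Int) (best : Int) : run Aarr Barr [] best = best := by
  rw [run, runGo]

theorem run_cons (Aarr Barr Av Bv : List Int) (lv s : Int)
    (rest : List (List Int × List Int × Int × Int)) (best : Int) :
    run Aarr Barr ((Av, Bv, lv, s) :: rest) best
      = if s > best then run Aarr Barr rest best
        else if lv = (Aarr.length : Int) then run Aarr Barr rest s
        else run Aarr Barr (childrenOf Aarr Barr Av Bv lv s ++ rest) best := by
  have hw : 0 < (Aarr.length * Barr.length + 1) ^ availCount Aarr.length Av :=
    Nat.pow_pos (Nat.succ_pos _)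
  have hsw : stackWeight Aarr Barr ((Av, Bv, lv, s) :: rest)
      = (Aarr.length * Barr.length + 1) ^ availCount Aarr.length Av
        + stackWeight Aarr Barr rest := by
    simp [stackWeight]
  have hch : stackWeight Aarr Barr (childrenOf Aarr Barr Av Bv lv s ++ rest)
      < stackWeight Aarr Barr ((Av, Bv, lv, s) :: rest) := by
    have := childrenWeight_lt Aarr Barr Av Bv lv s
    simp only [stackWeight, List.map_append, List.sum_append] at *
    omega
  rw [run, runGo]
  by_cases hp : s > best
  · rw [if_pos hp, if_pos hp]
    exact runGo_irrel Aarr Barr _ _ rest best (by omega) (by omega)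
  · by_cases hl : lv = (Aarr.length : Int)
    · rw [if_neg hp, if_neg hp, if_pos hl, if_pos hl]
      exact runGo_irrel Aarr Barr _ _ rest s (by omega) (by omega)
    · rw [if_neg hp, if_neg hp, if_neg hl, if_neg hl]
      rw [hsw] at hch
      exact runGo_irrel Aarr Barr _ _ _ best (by omega) (by omega)

-- popping one frame computes dfs on it and continues with the rest of the stack
theorem run_frame (Aarr Barr : List Int) :
    ∀ (v : Nat) (Av Bv : List Int) (lv s : Int), availCount Aarr.length Av ≤ v →
      ∀ (rest : List (List Int × List Int × Int × Int)) (best : Int),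
        run Aarr Barr ((Av, Bv, lv, s) :: rest) best
          = run Aarr Barr rest (dfs Aarr Barr Av Bv lv s best) := by
  intro v
  induction v with
  | zero =>
    intro Av Bv lv s hv rest best
    have hnil : childrenOf Aarr Barr Av Bv lv s = [] := by
      rcases h : childrenOf Aarr Barr Av Bv lv s with _ | ⟨c, cs⟩
      · rfl
      · exfalso
        have := mem_childrenOf (h ▸ List.mem_cons_self (l := cs))
        omega
    rw [run_cons, dfs_eq_node]
    by_cases h1 : s > best
    · rw [if_pos h1, if_pos h1]
    · rw [if_neg h1, if_neg h1]
      by_cases h2 : lv = (Aarr.length : Int)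
      · rw [if_pos h2, if_pos h2, if_pos (not_lt.mp h1)]
      · rw [if_neg h2, if_neg h2, hnil]
        rfl
  | succ v ih =>
    intro Av Bv lv s hv rest best
    have haux : ∀ (cs : List (List Int × List Int × Int × Int)),
        (∀ c ∈ cs, availCount Aarr.length c.1 ≤ v) →
        ∀ (rest : List (List Int × List Int × Int × Int)) (best : Int),
          run Aarr Barr (cs ++ rest) best
            = run Aarr Barr rest (List.foldl (nodeStep Aarr Barr) best cs) := by
      intro cs
      induction cs with
      | nil => intro _ rest best; simp
      | cons c cs ih2 =>
        intro hcs rest best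
        obtain ⟨c1, c2, c3, c4⟩ := c
        rw [List.cons_append, ih c1 c2 c3 c4 (hcs _ List.mem_cons_self), List.foldl_cons]
        exact ih2 (fun c hc => hcs c (List.mem_cons_of_mem _ hc)) rest _
    rw [run_cons, dfs_eq_node]
    by_cases h1 : s > best
    · rw [if_pos h1, if_pos h1]
    · rw [if_neg h1, if_neg h1]
      by_cases h2 : lv = (Aarr.length : Int)
      · rw [if_pos h2, if_pos h2, if_pos (not_lt.mp h1)]
      · rw [if_neg h2, if_neg h2]
        exact haux _ (fun c hc => by
          have := mem_childrenOf hc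
          omega) rest best

-- ===== VERDICT (by name: the statement is the Claim_ definition above) =====
theorem dfs_spec : Claim_equal_dfs := by
  intro Aarr Barr A_visit B_visit lv sum min _
  unfold Spec_dfs
  have h := run_frame Aarr Barr (availCount Aarr.length A_visit) A_visit B_visit lv sum
    le_rfl [] min
  rw [run_nil] at h
  exact h.symm
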